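-- pv_equiv track=rewrite | github.com/MasterGroosha/telegram-casino-bot | bot/dice_check.py | get_combo_parts
-- ===== SOURCE A (Python) =====
-- from typing import List
--
-- def get_combo_parts(dice_value: int) -> List[str]:
--     """
--     Returns exact icons from dice (bar, grapes, lemon, seven).
--     Do not edit these values, since they are subject to be translated
--     by outer code.
--     :param dice_value: dice value (1-64)
--     :return: list of icons' texts
--     """
--
--     # Alternative way (credits to t.me/svinerus):
--     #   return [casino[(dice_value - 1) // i % 4]for i in (1, 4, 16)]
--
--     # Do not edit these values; they are actually translation keys
--     #           0       1         2        3
--     values = ["bar", "grapes", "lemon", "seven"]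
--
--     dice_value -= 1
--     result = []
--     for _ in range(3):
--         result.append(values[dice_value % 4])
--         dice_value //= 4
--     return result
-- ===== SOURCE B (Python) =====
-- from typing import List
--
-- def get_combo_parts(dice_value: int) -> List[str]:
--     # Precompute the full 64-entry combo table (nested comprehension,
--     # slowest-varying icon last) and look the answer up by a single
--     # modular index -- no digit arithmetic at query time.
--     values = ["bar", "grapes", "lemon", "seven"]
--     table = [[a, b, c] for c in values for b in values for a in values]
--     return table[(dice_value - 1) % 64]
-- ===== Notes on version B (the rewrite author's own statement) =====
-- stated objective: alternative
-- what changed: Replaces A's per-call digit-extraction loop (mutating dice_value with %4 and //=4) by precomputing the full 64-entry combination table with a nested comprehension and answering with a single modular table lookup.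
import Mathlib
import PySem

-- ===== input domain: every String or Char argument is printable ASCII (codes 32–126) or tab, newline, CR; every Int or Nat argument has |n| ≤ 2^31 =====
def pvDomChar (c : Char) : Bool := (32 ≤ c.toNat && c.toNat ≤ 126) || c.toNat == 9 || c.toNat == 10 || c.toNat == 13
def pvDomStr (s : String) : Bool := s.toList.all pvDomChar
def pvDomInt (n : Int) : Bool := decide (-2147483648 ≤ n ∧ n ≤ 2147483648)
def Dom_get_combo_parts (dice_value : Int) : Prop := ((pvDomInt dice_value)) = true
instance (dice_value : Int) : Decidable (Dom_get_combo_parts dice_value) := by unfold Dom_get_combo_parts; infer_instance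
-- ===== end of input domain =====

-- B precomputes the full 64-entry combo table and answers by one modular lookup instead of A's digit-extraction loop (objective: alternative).


-- ===== PORT A =====
-- literal port of A: subtract 1, then loop 3 times appending values[d % 4] and flooring d by 4
def get_combo_parts (dice_value : Int) : List String :=
  let values : List String := ["bar", "grapes", "lemon", "seven"]
  let d0 := dice_value - 1
  let st := (PySem.List.pyRange 0 3 1).foldl
    (fun (st : Int × List String) _ =>
      (PySem.Int.floordiv st.1 4,
       st.2 ++ [PySem.List.pyGetD values (PySem.Int.mod st.1 4) ""]))
    (d0, [])
  st.2

-- ===== PORT B =====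
-- literal port of B: build the 64-entry table by a nested comprehension, index it by (dice_value - 1) % 64
def get_combo_parts_alt (dice_value : Int) : List String :=
  let values : List String := ["bar", "grapes", "lemon", "seven"]
  let table : List (List String) :=
    values.flatMap (fun c => values.flatMap (fun b => values.map (fun a => [a, b, c])))
  PySem.List.pyGetD table (PySem.Int.mod (dice_value - 1) 64) []

-- ===== PRECONDITION & SPEC =====
def Spec_get_combo_parts (dice_value : Int) (out : List String) : Prop := out = get_combo_parts_alt dice_value
instance (dice_value : Int) (out : List String) : Decidable (Spec_get_combo_parts dice_value out) := by unfold Spec_get_combo_parts; infer_instance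

-- ===== CLAIM (what is proved, stated in full; the proofs are below) =====
def Claim_equal_get_combo_parts : Prop := ∀ (dice_value : Int), Dom_get_combo_parts dice_value → Spec_get_combo_parts dice_value (get_combo_parts dice_value)

-- ===== LEMMAS AND PROOFS =====

-- ===== VERDICT (by name: the statement is the Claim_ definition above) =====
-- both sides depend on dice_value - 1 only through its residue mod 64; finish by 64 cases
theorem pv_core (n : Int) :
    get_combo_parts (n + 1) = get_combo_parts_alt (n + 1) := by
  have hr4 : (0:Int) < 4 := by omega
  have hr64 : (0:Int) < 64 := by omega
  simp only [get_combo_parts, get_combo_parts_alt, add_sub_cancel_right]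
  have hrange : PySem.List.pyRange 0 3 1 = [0, 1, 2] := by decide
  rw [hrange]
  simp only [List.foldl]
  rw [PySem.Int.mod_eq_emod_of_pos hr4, PySem.Int.mod_eq_emod_of_pos hr4,
      PySem.Int.mod_eq_emod_of_pos hr4, PySem.Int.mod_eq_emod_of_pos hr64,
      PySem.Int.floordiv_eq_ediv_of_pos hr4, PySem.Int.floordiv_eq_ediv_of_pos hr4]
  set r := n % 64 with hr
  have h0 : n % 4 = r % 4 := by omega
  have h1 : (n / 4) % 4 = (r / 4) % 4 := by omega
  have h2 : ((n / 4) / 4) % 4 = ((r / 4) / 4) % 4 := by omega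
  rw [h0, h1, h2]
  have hb : 0 ≤ r ∧ r < 64 := by omega
  obtain ⟨hl, hu⟩ := hb
  interval_cases r <;> rfl

theorem get_combo_parts_spec : Claim_equal_get_combo_parts := by
  intro dice_value _
  show get_combo_parts dice_value = get_combo_parts_alt dice_value
  have := pv_core (dice_value - 1)
  simpa using this
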